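-- pv_equiv track=rewrite | github.com/rahul-tamanam/TaxBuddy | src/core/text_preprocessor.py | _join_soft_line_breaks
-- ===== SOURCE A (Python) =====
-- def _join_soft_line_breaks(text: str) -> str:
--     """
--     Join lines that are clearly continuations (line ends without . ? ! : ; and next line
--     starts with lowercase or digit). Preserves paragraph breaks (blank lines) and
--     list/section starts (next line starts with capital or bullet).
--     """
--     lines = text.split("\n")
--     if not lines:
--         return text
--     result = []
--     i = 0
--     while i < len(lines):
--         line = lines[i]
--         # Skip empty lines (keep as paragraph break)
--         if not line.strip():
--             result.append("")
--             i += 1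
--             continue
--         # Look ahead: if next line is not empty and current doesn't end with sentence end,
--         # and next line starts with lowercase or digit, join with space
--         while i + 1 < len(lines):
--             next_line = lines[i + 1]
--             if not next_line.strip():
--                 break
--             stripped = line.rstrip()
--             if not stripped:
--                 break
--             last_char = stripped[-1]
--             first_next = next_line.lstrip()
--             if not first_next:
--                 break
--             first_char = first_next[0]
--             # Sentence end or colon/semicolon: do not join
--             if last_char in ".?!:;":
--                 break
--             # Next line starts with capital and looks like new sentence (optional)
--             if first_char.isupper() and last_char in ")\"":
--                 break
--             # Join: current line continues on next (e.g. "income\nfrom sources")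
--             if first_char.islower() or first_char.isdigit() or last_char in "(-'\"":
--                 line = line.rstrip() + " " + next_line.lstrip()
--                 i += 1
--                 continue
--             break
--         result.append(line)
--         i += 1
--     return "\n".join(result)
-- ===== SOURCE B (Python) =====
-- def _should_join(prev: str, nxt: str) -> bool:
--     last = prev.rstrip()[-1]
--     first = nxt.lstrip()[0]
--     if last in ".?!:;":
--         return False
--     if first.isupper() and last in ")\"":
--         return False
--     return first.islower() or first.isdigit() or last in "(-'\""
--
--
-- def _join_soft_line_breaks(text: str) -> str:
--     result = []
--     current = None  # running buffer of the paragraph line being accumulated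
--     for line in text.split("\n"):
--         if not line.strip():
--             if current is not None:
--                 result.append(current)
--             result.append("")
--             current = None
--         elif current is None:
--             current = line
--         elif _should_join(current, line):
--             current = current.rstrip() + " " + line.lstrip()
--         else:
--             result.append(current)
--             current = line
--     if current is not None:
--         result.append(current)
--     return "\n".join(result)
-- ===== Notes on version B (the rewrite author's own statement) =====
-- stated objective: simpler
-- what changed: Replaces the nested index loops (outer while over i plus an inner lookahead while that advances i) with a single forward for-pass over the lines keeping a running line buffer, with the join predicate factored into a helper applied to the accumulated buffer.
import Mathlib
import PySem

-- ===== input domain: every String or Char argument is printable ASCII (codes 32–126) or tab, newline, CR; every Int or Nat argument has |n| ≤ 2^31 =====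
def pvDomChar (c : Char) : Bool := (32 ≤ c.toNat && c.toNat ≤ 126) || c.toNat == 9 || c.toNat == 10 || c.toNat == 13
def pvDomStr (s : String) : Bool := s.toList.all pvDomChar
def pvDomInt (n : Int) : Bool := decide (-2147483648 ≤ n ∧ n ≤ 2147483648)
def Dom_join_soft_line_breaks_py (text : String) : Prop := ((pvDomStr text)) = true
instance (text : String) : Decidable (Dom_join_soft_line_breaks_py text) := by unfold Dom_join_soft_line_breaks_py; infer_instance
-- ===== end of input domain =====

-- B replaces A's nested outer/inner index loops by a single forward pass with a running
-- buffer and a factored-out join predicate (objective: simpler; same asymptotic cost).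

-- ===== PORT A =====
-- inner `while i + 1 < len(lines)` lookahead loop of A: state is the current joined `line`
-- and the remaining lines after position i; returns the final line and the remaining lines.
def pvInnerA (line : List Char) : List (List Char) → List Char × List (List Char)
  | [] => (line, [])
  | nxt :: rs =>
    if (PySem.Chars.strip nxt).isEmpty then (line, nxt :: rs)        -- `if not next_line.strip(): break`
    else
      let stripped := PySem.Chars.rstrip line
      if stripped.isEmpty then (line, nxt :: rs)                     -- `if not stripped: break`
      else
        match PySem.List.pyGet? stripped (-1) with                   -- `last_char = stripped[-1]`
        | none => (line, nxt :: rs)                                  -- unreachable: stripped nonempty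
        | some last_char =>
          let first_next := PySem.Chars.lstrip nxt
          if first_next.isEmpty then (line, nxt :: rs)               -- `if not first_next: break`
          else
            match PySem.List.pyGet? first_next 0 with                -- `first_char = first_next[0]`
            | none => (line, nxt :: rs)                              -- unreachable: first_next nonempty
            | some first_char =>
              if (".?!:;".toList.contains last_char) then (line, nxt :: rs)
              else if PySem.Chars.isupper first_char && (")\"".toList.contains last_char) then
                (line, nxt :: rs)
              else if PySem.Chars.islower first_char || PySem.Chars.isdigit first_char
                   || ("(-'\"".toList.contains last_char) then
                pvInnerA (PySem.Chars.rstrip line ++ [' '] ++ PySem.Chars.lstrip nxt) rs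
              else (line, nxt :: rs)

theorem pvInnerA_len (line : List Char) (rest : List (List Char)) :
    (pvInnerA line rest).2.length ≤ rest.length := by
  induction rest generalizing line with
  | nil => simp [pvInnerA]
  | cons nxt rs ih =>
    simp only [pvInnerA]
    by_cases h1 : (PySem.Chars.strip nxt).isEmpty
    · simp [h1]
    by_cases h2 : (PySem.Chars.rstrip line).isEmpty
    · simp [h1, h2]
    cases hg1 : PySem.List.pyGet? (PySem.Chars.rstrip line) (-1) with
    | none => simp [h1, h2]
    | some last =>
      by_cases h3 : (PySem.Chars.lstrip nxt).isEmpty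
      · simp [h1, h2, h3]
      cases hg2 : PySem.List.pyGet? (PySem.Chars.lstrip nxt) 0 with
      | none => simp [h1, h2, h3]
      | some first =>
        simp only [h1, h2, h3]
        split_ifs <;>
          first
            | exact le_trans (ih _) (Nat.le_succ _)
            | simp

-- outer `while i < len(lines)` loop of A
def pvOuterA : List (List Char) → List (List Char)
  | [] => []
  | l :: rest =>
    if (PySem.Chars.strip l).isEmpty then [] :: pvOuterA rest        -- `if not line.strip()`: append ""
    else
      let p := pvInnerA l rest
      p.1 :: pvOuterA p.2
termination_by ls => ls.length
decreasing_by
  · simp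
  · exact Nat.lt_succ_of_le (pvInnerA_len l rest)

def join_soft_line_breaks_py (text : String) : String :=
  let lines := PySem.Chars.splitOn text.toList ['\n']                -- `lines = text.split("\n")`
  if lines = [] then text                                            -- `if not lines: return text` (split never returns [])
  else String.ofList (PySem.Chars.join ['\n'] (pvOuterA lines))      -- `"\n".join(result)`

-- ===== PORT B =====
-- helper `_should_join(prev, nxt)` of Source B; the `none` arm is unreachable from B's loop
-- (prev and nxt are always non-blank there; Python would raise IndexError on it).
def pvShouldJoin (prev nxt : List Char) : Bool :=
  match PySem.List.pyGet? (PySem.Chars.rstrip prev) (-1),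
        PySem.List.pyGet? (PySem.Chars.lstrip nxt) 0 with
  | some last, some first =>
    if (".?!:;".toList.contains last) then false
    else if PySem.Chars.isupper first && (")\"".toList.contains last) then false
    else PySem.Chars.islower first || PySem.Chars.isdigit first || ("(-'\"".toList.contains last)
  | _, _ => false

-- the single `for line in lines` pass of Source B; cur is the running line buffer
def pvLoopB (cur : Option (List Char)) : List (List Char) → List (List Char)
  | [] =>
    match cur with
    | none => []
    | some c => [c]                                                  -- final flush
  | l :: rest =>
    if (PySem.Chars.strip l).isEmpty then
      (match cur with | none => [] | some c => [c]) ++ [] :: pvLoopB none rest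
    else
      match cur with
      | none => pvLoopB (some l) rest
      | some c =>
        if pvShouldJoin c l then
          pvLoopB (some (PySem.Chars.rstrip c ++ [' '] ++ PySem.Chars.lstrip l)) rest
        else c :: pvLoopB (some l) rest

def join_soft_line_breaks_py_alt (text : String) : String :=
  String.ofList (PySem.Chars.join ['\n']
    (pvLoopB none (PySem.Chars.splitOn text.toList ['\n'])))

-- ===== PRECONDITION & SPEC =====
def Spec_join_soft_line_breaks_py (text : String) (out : String) : Prop := out = join_soft_line_breaks_py_alt text
instance (text : String) (out : String) : Decidable (Spec_join_soft_line_breaks_py text out) := by unfold Spec_join_soft_line_breaks_py; infer_instance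

-- ===== CLAIM (what is proved, stated in full; the proofs are below) =====
def Claim_equal_join_soft_line_breaks_py : Prop := ∀ (text : String), Dom_join_soft_line_breaks_py text → Spec_join_soft_line_breaks_py text (join_soft_line_breaks_py text)

-- ===== LEMMAS AND PROOFS =====

theorem pv_lstrip_eq_nil_iff (l : List Char) :
    PySem.Chars.lstrip l = [] ↔ ∀ x ∈ l, PySem.Chars.isspace x = true := by
  simp [PySem.Chars.lstrip, List.dropWhile_eq_nil_iff]

theorem pv_rstrip_eq_nil_iff (l : List Char) :
    PySem.Chars.rstrip l = [] ↔ ∀ x ∈ l, PySem.Chars.isspace x = true := by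
  simp [PySem.Chars.rstrip, List.dropWhile_eq_nil_iff]

theorem pv_strip_eq_nil_iff (l : List Char) :
    PySem.Chars.strip l = [] ↔ ∀ x ∈ l, PySem.Chars.isspace x = true := by
  simp only [PySem.Chars.strip, pv_rstrip_eq_nil_iff, PySem.Chars.lstrip]
  constructor
  · intro h x hx
    have h2 : x ∈ l.takeWhile PySem.Chars.isspace ++ l.dropWhile PySem.Chars.isspace := by
      rw [List.takeWhile_append_dropWhile]; exact hx
    rcases List.mem_append.mp h2 with h1 | h1
    · exact List.mem_takeWhile_imp h1
    · exact h x h1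
  · intro h x hx
    exact h x ((List.dropWhile_sublist _).subset hx)

theorem pv_rstrip_ne_nil (l : List Char) (h : PySem.Chars.strip l ≠ []) :
    PySem.Chars.rstrip l ≠ [] := by
  intro h0; exact h ((pv_strip_eq_nil_iff l).mpr ((pv_rstrip_eq_nil_iff l).mp h0))

theorem pv_lstrip_ne_nil (l : List Char) (h : PySem.Chars.strip l ≠ []) :
    PySem.Chars.lstrip l ≠ [] := by
  intro h0; exact h ((pv_strip_eq_nil_iff l).mpr ((pv_lstrip_eq_nil_iff l).mp h0))

-- the last char of a nonempty rstrip is not a space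
theorem pv_rstrip_getLast_not_space (l : List Char) (h : PySem.Chars.rstrip l ≠ []) :
    PySem.Chars.isspace ((PySem.Chars.rstrip l).getLast h) = false := by
  simp only [PySem.Chars.rstrip] at h ⊢
  rw [List.getLast_reverse]
  exact List.head_dropWhile_not _ _

-- a joined buffer is still non-blank
theorem pv_join_nonblank (c nxt : List Char) (hc : PySem.Chars.strip c ≠ []) :
    PySem.Chars.strip (PySem.Chars.rstrip c ++ [' '] ++ PySem.Chars.lstrip nxt) ≠ [] := by
  have hr := pv_rstrip_ne_nil c hc
  intro h0
  have hall := (pv_strip_eq_nil_iff _).mp h0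
  have hmem : (PySem.Chars.rstrip c).getLast hr ∈
      PySem.Chars.rstrip c ++ [' '] ++ PySem.Chars.lstrip nxt := by
    simp [List.mem_append, List.getLast_mem hr]
  have := hall _ hmem
  rw [pv_rstrip_getLast_not_space c hr] at this
  exact absurd this (by simp)

-- pyGet? at -1 / 0 on a nonempty list
theorem pv_pyGet_neg_one {α : Type} (l : List α) (h : l ≠ []) :
    PySem.List.pyGet? l (-1) = some (l.getLast h) := by
  simp only [PySem.List.pyGet?, PySem.List.pyIdx?]
  have hl : 0 < l.length := List.length_pos_iff.mpr h
  rw [if_neg (by omega), if_pos (by omega : -(l.length : Int) ≤ -1)]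
  have h1 : l.length - (-(-1 : Int)).toNat = l.length - 1 := by norm_num
  rw [h1]
  simp [List.getLast_eq_getElem]

theorem pv_pyGet_zero {α : Type} (l : List α) (h : l ≠ []) :
    PySem.List.pyGet? l 0 = some (l.head h) := by
  simp only [PySem.List.pyGet?, PySem.List.pyIdx?]
  have hl : 0 < l.length := List.length_pos_iff.mpr h
  rw [if_pos (by omega), if_pos (by exact_mod_cast hl)]
  simp [List.head_eq_getElem, List.getElem?_eq_getElem hl]

-- key bridge: B's pass with a non-blank buffer equals A's inner lookahead followed by the rest
theorem pv_loopB_some (rest : List (List Char)) (c : List Char)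
    (hc : PySem.Chars.strip c ≠ []) :
    pvLoopB (some c) rest = (pvInnerA c rest).1 :: pvLoopB none (pvInnerA c rest).2 := by
  induction rest generalizing c with
  | nil => simp [pvLoopB, pvInnerA]
  | cons nxt rs ih =>
    by_cases hb : (PySem.Chars.strip nxt).isEmpty
    · -- blank next line: both flush
      simp [pvLoopB, pvInnerA, hb]
    · have hbn : PySem.Chars.strip nxt ≠ [] := by
        simpa [List.isEmpty_iff] using hb
      have hr : PySem.Chars.rstrip c ≠ [] := pv_rstrip_ne_nil c hc
      have hlt : PySem.Chars.lstrip nxt ≠ [] := pv_lstrip_ne_nil nxt hbn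
      have hlast := pv_pyGet_neg_one _ hr
      have hfirst := pv_pyGet_zero _ hlt
      set last := (PySem.Chars.rstrip c).getLast hr with hL
      set first := (PySem.Chars.lstrip nxt).head hlt with hF
      have hSJ : pvShouldJoin c nxt =
          (if (".?!:;".toList.contains last) then false
           else if PySem.Chars.isupper first && (")\"".toList.contains last) then false
           else PySem.Chars.islower first || PySem.Chars.isdigit first
             || ("(-'\"".toList.contains last)) := by
        simp [pvShouldJoin, hlast, hfirst]
      have hIA : pvInnerA c (nxt :: rs) =
          (if (".?!:;".toList.contains last) then (c, nxt :: rs)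
           else if PySem.Chars.isupper first && (")\"".toList.contains last) then (c, nxt :: rs)
           else if PySem.Chars.islower first || PySem.Chars.isdigit first
               || ("(-'\"".toList.contains last) then
             pvInnerA (PySem.Chars.rstrip c ++ [' '] ++ PySem.Chars.lstrip nxt) rs
           else (c, nxt :: rs)) := by
        simp only [pvInnerA]
        rw [if_neg hb, if_neg (by simpa [List.isEmpty_iff] using hr), hlast]
        simp only []
        rw [if_neg (by simpa [List.isEmpty_iff] using hlt), hfirst]
      have hLB : pvLoopB (some c) (nxt :: rs) =
          (if pvShouldJoin c nxt then
            pvLoopB (some (PySem.Chars.rstrip c ++ [' '] ++ PySem.Chars.lstrip nxt)) rs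
           else c :: pvLoopB (some nxt) rs) := by
        simp [pvLoopB, hb]
      have hNB : pvLoopB none (nxt :: rs) = pvLoopB (some nxt) rs := by
        simp [pvLoopB, hb]
      by_cases h1 : (".?!:;".toList.contains last)
      · rw [hLB, hSJ, if_pos h1, hIA, if_pos h1]
        simp [hNB]
      · by_cases h2 : PySem.Chars.isupper first && (")\"".toList.contains last)
        · rw [hLB, hSJ, if_neg h1, if_pos h2, hIA, if_neg h1, if_pos h2]
          simp [hNB]
        · by_cases h3 : PySem.Chars.islower first || PySem.Chars.isdigit first
              || ("(-'\"".toList.contains last)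
          · rw [hLB, hSJ, if_neg h1, if_neg h2, if_pos h3, hIA, if_neg h1, if_neg h2,
              if_pos h3]
            exact ih _ (pv_join_nonblank c nxt hc)
          · rw [hLB, hSJ, if_neg h1, if_neg h2, if_neg h3, hIA, if_neg h1,
              if_neg h2, if_neg h3]
            simp [hNB]

theorem pv_main_aux (n : Nat) :
    ∀ lines : List (List Char), lines.length ≤ n → pvOuterA lines = pvLoopB none lines := by
  induction n with
  | zero =>
    intro lines h
    have : lines = [] := List.length_eq_zero_iff.mp (Nat.le_zero.mp h)
    simp [this, pvOuterA, pvLoopB]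
  | succ n ih =>
    intro lines h
    match lines with
    | [] => simp [pvOuterA, pvLoopB]
    | l :: rest =>
      simp only [List.length_cons, Nat.succ_le_succ_iff] at h
      by_cases hb : (PySem.Chars.strip l).isEmpty
      · simp only [pvOuterA, pvLoopB, if_pos hb]
        rw [ih rest h]
        rfl
      · have hbn : PySem.Chars.strip l ≠ [] := by simpa [List.isEmpty_iff] using hb
        simp only [pvOuterA, if_neg hb]
        have hB : pvLoopB none (l :: rest) = pvLoopB (some l) rest := by
          simp [pvLoopB, hb]
        rw [hB, pv_loopB_some rest l hbn,
          ih (pvInnerA l rest).2 (le_trans (pvInnerA_len l rest) h)]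

theorem pv_main (lines : List (List Char)) : pvOuterA lines = pvLoopB none lines :=
  pv_main_aux lines.length lines le_rfl

-- text.split("\n") is never the empty list
theorem pv_splitOn_go_ne_nil (sep : List Char) (fuel : Nat) :
    ∀ (l cur : List Char) (acc : List (List Char)),
      PySem.Chars.splitOn.go sep fuel l cur acc ≠ [] := by
  induction fuel with
  | zero => intro l cur acc; simp [PySem.Chars.splitOn.go]
  | succ fuel ih =>
    intro l cur acc
    match l with
    | [] => simp [PySem.Chars.splitOn.go]
    | c :: rest =>
      simp only [PySem.Chars.splitOn.go]
      split_ifs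
      · exact ih _ _ _
      · exact ih _ _ _

theorem pv_splitOn_ne_nil (s sep : List Char) : PySem.Chars.splitOn s sep ≠ [] := by
  simp only [PySem.Chars.splitOn]
  exact pv_splitOn_go_ne_nil sep _ _ _ _

-- ===== VERDICT (by name: the statement is the Claim_ definition above) =====
theorem join_soft_line_breaks_py_spec : Claim_equal_join_soft_line_breaks_py := by
  intro text _
  unfold Spec_join_soft_line_breaks_py join_soft_line_breaks_py join_soft_line_breaks_py_alt
  rw [if_neg (pv_splitOn_ne_nil _ _), pv_main]
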